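-- pv_equiv track=rewrite | github.com/ericrihm/JobSentinel | sentinel/validator.py | _is_known_company
-- ===== SOURCE A (Python) =====
-- KNOWN_COMPANIES: set[str] = {
--     # Big Tech
--     "google", "alphabet", "meta", "facebook", "apple", "amazon", "microsoft",
--     "netflix", "nvidia", "intel", "ibm", "oracle", "salesforce", "adobe",
--     "sap", "vmware", "cisco", "qualcomm", "broadcom", "amd", "texas instruments",
--     # Cloud & Infrastructure
--     "aws", "azure", "gcp", "cloudflare", "fastly", "twilio", "okta",
--     "datadog", "splunk", "pagerduty", "elastic", "mongodb", "redis labs",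
--     "hashicorp", "confluent", "databricks", "snowflake", "palantir",
--     # Fintech & Finance
--     "stripe", "square", "block", "paypal", "coinbase", "robinhood", "plaid",
--     "affirm", "klarna", "brex", "ripple", "chime", "wise", "checkout.com",
--     "jpmorgan", "jp morgan", "goldman sachs", "morgan stanley", "wells fargo",
--     "bank of america", "citibank", "citi", "blackrock", "fidelity", "vanguard",
--     "american express", "visa", "mastercard", "capital one",
--     # E-commerce & Marketplace
--     "shopify", "ebay", "etsy", "wayfair", "chewy", "doordash", "instacart",
--     "grubhub", "uber eats", "postmates",
--     # Ride & Delivery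
--     "uber", "lyft", "airbnb", "doordash",
--     # Enterprise SaaS
--     "workday", "servicenow", "zendesk", "hubspot", "atlassian", "slack",
--     "zoom", "dropbox", "box", "docusign", "veeva", "coupa", "freshworks",
--     "sprinklr", "medallia", "qualtrics",
--     # Security
--     "crowdstrike", "palo alto networks", "fortinet", "zscaler", "sentinelone",
--     "cyberark", "rapid7", "qualys", "tenable",
--     # Dev Tools & Infra
--     "github", "gitlab", "jfrog", "sonatype", "circleci", "harness",
--     "jetbrains", "postman", "new relic",
--     # Healthcare & Biotech
--     "unitedhealth", "anthem", "aetna", "cigna", "humana", "cvs health",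
--     "johnson & johnson", "pfizer", "moderna", "gilead", "biogen",
--     "epic systems", "cerner", "allscripts", "change healthcare",
--     "teladoc", "veracyte", "guardant health",
--     # Media & Entertainment
--     "disney", "warner bros", "comcast", "nbc universal", "fox", "viacomcbs",
--     "paramount", "sony", "spotify", "tiktok", "bytedance", "snapchat",
--     "twitter", "x corp", "reddit", "pinterest", "linkedin",
--     # Consulting & Professional Services
--     "mckinsey", "bain", "bcg", "deloitte", "pwc", "kpmg", "ey",
--     "ernst & young", "accenture", "booz allen", "leidos", "saic",
--     # Retail
--     "walmart", "target", "costco", "kroger", "home depot", "lowes",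
--     "best buy", "nordstrom", "macy's",
--     # Telecom
--     "at&t", "verizon", "t-mobile", "comcast", "charter",
--     # Aerospace & Defense
--     "lockheed martin", "raytheon", "boeing", "northrop grumman", "general dynamics",
--     "spacex", "blue origin",
--     # Automotive
--     "tesla", "ford", "general motors", "gm", "toyota", "honda", "bmw",
--     "volkswagen", "stellantis", "rivian", "lucid",
--     # AI / ML
--     "openai", "anthropic", "cohere", "hugging face", "scale ai",
--     "deepmind", "inflection", "stability ai",
-- }
--
-- def _is_known_company(company_name: str) -> bool:
--     """Check against a hardcoded list of known major employers.
--     Quick offline check — not exhaustive but catches obvious legitimacy.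
--     """
--     name = company_name.strip().lower()
--     if name in KNOWN_COMPANIES:
--         return True
--     for known in KNOWN_COMPANIES:
--         if name == known or name.startswith(known + " ") or name.endswith(" " + known):
--             return True
--     return False
-- ===== SOURCE B (Python) =====
-- _KNOWN_BLOBS = [
--     "google|alphabet|meta|facebook|apple|amazon|microsoft|netflix|nvidia|intel|ibm|oracle",
--     "salesforce|adobe|sap|vmware|cisco|qualcomm|broadcom|amd|texas instruments|aws|azure|gcp",
--     "cloudflare|fastly|twilio|okta|datadog|splunk|pagerduty|elastic|mongodb|redis labs|hashicorp|confluent",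
--     "databricks|snowflake|palantir|stripe|square|block|paypal|coinbase|robinhood|plaid|affirm|klarna",
--     "brex|ripple|chime|wise|checkout.com|jpmorgan|jp morgan|goldman sachs|morgan stanley|wells fargo|bank of america|citibank",
--     "citi|blackrock|fidelity|vanguard|american express|visa|mastercard|capital one|shopify|ebay|etsy|wayfair",
--     "chewy|doordash|instacart|grubhub|uber eats|postmates|uber|lyft|airbnb|workday|servicenow|zendesk",
--     "hubspot|atlassian|slack|zoom|dropbox|box|docusign|veeva|coupa|freshworks|sprinklr|medallia",
--     "qualtrics|crowdstrike|palo alto networks|fortinet|zscaler|sentinelone|cyberark|rapid7|qualys|tenable|github|gitlab",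
--     "jfrog|sonatype|circleci|harness|jetbrains|postman|new relic|unitedhealth|anthem|aetna|cigna|humana",
--     "cvs health|johnson & johnson|pfizer|moderna|gilead|biogen|epic systems|cerner|allscripts|change healthcare|teladoc|veracyte",
--     "guardant health|disney|warner bros|comcast|nbc universal|fox|viacomcbs|paramount|sony|spotify|tiktok|bytedance",
--     "snapchat|twitter|x corp|reddit|pinterest|linkedin|mckinsey|bain|bcg|deloitte|pwc|kpmg",
--     "ey|ernst & young|accenture|booz allen|leidos|saic|walmart|target|costco|kroger|home depot|lowes",
--     "best buy|nordstrom|macy's|at&t|verizon|t-mobile|charter|lockheed martin|raytheon|boeing|northrop grumman|general dynamics",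
--     "spacex|blue origin|tesla|ford|general motors|gm|toyota|honda|bmw|volkswagen|stellantis|rivian",
--     "lucid|openai|anthropic|cohere|hugging face|scale ai|deepmind|inflection|stability ai",
-- ]
--
-- KNOWN_COMPANIES: set[str] = {
--     name for blob in _KNOWN_BLOBS for name in blob.split("|")
-- }
--
--
-- def _is_known_company(company_name: str) -> bool:
--     """Check against a hardcoded list of known major employers.
--
--     B treats the known-company set as a pure lookup table: the name matches
--     iff it is itself known, or some single-space position splits off a known
--     prefix (startswith known + " ") or known suffix (endswith " " + known).
--     """
--     name = company_name.strip().lower()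
--     if name in KNOWN_COMPANIES:
--         return True
--     return any(
--         ch == " " and (name[:i] in KNOWN_COMPANIES or name[i + 1:] in KNOWN_COMPANIES)
--         for i, ch in enumerate(name)
--     )
-- ===== Notes on version B (the rewrite author's own statement) =====
-- stated objective: alternative
-- what changed: Instead of scanning all ~200 known companies and comparing each against the name's ends, B iterates over the space positions of the stripped lowered name and looks the prefix before / suffix after each space up in the set directly; the set itself is built once by splitting compact pipe-joined blobs.
import Mathlib
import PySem

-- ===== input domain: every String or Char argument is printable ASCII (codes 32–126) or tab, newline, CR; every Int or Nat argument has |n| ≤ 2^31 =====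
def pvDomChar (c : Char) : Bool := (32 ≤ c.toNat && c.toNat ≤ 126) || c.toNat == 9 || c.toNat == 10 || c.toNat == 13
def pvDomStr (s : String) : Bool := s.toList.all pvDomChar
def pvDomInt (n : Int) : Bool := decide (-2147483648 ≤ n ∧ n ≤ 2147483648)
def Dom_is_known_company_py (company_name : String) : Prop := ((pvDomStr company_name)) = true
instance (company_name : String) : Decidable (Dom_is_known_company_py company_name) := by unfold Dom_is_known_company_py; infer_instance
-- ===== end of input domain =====

-- B scans the space positions of the (stripped, lowered) name and looks each prefix/suffix
-- up in the known-company set (built once from a joined blob), instead of scanning all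
-- ~200 known companies and comparing each against the name's ends (objective: alternative).

-- ===== PORT A =====
def knownCompaniesList : List String := [
  "google", "alphabet", "meta", "facebook", "apple", "amazon",
  "microsoft", "netflix", "nvidia", "intel", "ibm", "oracle",
  "salesforce", "adobe", "sap", "vmware", "cisco", "qualcomm",
  "broadcom", "amd", "texas instruments", "aws", "azure", "gcp",
  "cloudflare", "fastly", "twilio", "okta", "datadog", "splunk",
  "pagerduty", "elastic", "mongodb", "redis labs", "hashicorp", "confluent",
  "databricks", "snowflake", "palantir", "stripe", "square", "block",
  "paypal", "coinbase", "robinhood", "plaid", "affirm", "klarna",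
  "brex", "ripple", "chime", "wise", "checkout.com", "jpmorgan",
  "jp morgan", "goldman sachs", "morgan stanley", "wells fargo", "bank of america", "citibank",
  "citi", "blackrock", "fidelity", "vanguard", "american express", "visa",
  "mastercard", "capital one", "shopify", "ebay", "etsy", "wayfair",
  "chewy", "doordash", "instacart", "grubhub", "uber eats", "postmates",
  "uber", "lyft", "airbnb", "workday", "servicenow", "zendesk",
  "hubspot", "atlassian", "slack", "zoom", "dropbox", "box",
  "docusign", "veeva", "coupa", "freshworks", "sprinklr", "medallia",
  "qualtrics", "crowdstrike", "palo alto networks", "fortinet", "zscaler", "sentinelone",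
  "cyberark", "rapid7", "qualys", "tenable", "github", "gitlab",
  "jfrog", "sonatype", "circleci", "harness", "jetbrains", "postman",
  "new relic", "unitedhealth", "anthem", "aetna", "cigna", "humana",
  "cvs health", "johnson & johnson", "pfizer", "moderna", "gilead", "biogen",
  "epic systems", "cerner", "allscripts", "change healthcare", "teladoc", "veracyte",
  "guardant health", "disney", "warner bros", "comcast", "nbc universal", "fox",
  "viacomcbs", "paramount", "sony", "spotify", "tiktok", "bytedance",
  "snapchat", "twitter", "x corp", "reddit", "pinterest", "linkedin",
  "mckinsey", "bain", "bcg", "deloitte", "pwc", "kpmg",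
  "ey", "ernst & young", "accenture", "booz allen", "leidos", "saic",
  "walmart", "target", "costco", "kroger", "home depot", "lowes",
  "best buy", "nordstrom", "macy's", "at&t", "verizon", "t-mobile",
  "charter", "lockheed martin", "raytheon", "boeing", "northrop grumman", "general dynamics",
  "spacex", "blue origin", "tesla", "ford", "general motors", "gm",
  "toyota", "honda", "bmw", "volkswagen", "stellantis", "rivian",
  "lucid", "openai", "anthropic", "cohere", "hugging face", "scale ai",
  "deepmind", "inflection", "stability ai"]

def knownCompaniesSet : PySem.Set String := PySem.Set.ofList knownCompaniesList

def is_known_company_py (company_name : String) : Bool :=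
  let name := PySem.Str.lower (PySem.Str.strip company_name)
  if PySem.Set.contains knownCompaniesSet name then true
  else
    knownCompaniesSet.any (fun known =>
      name == known
        || PySem.Str.startswith name (known ++ " ")
        || PySem.Str.endswith name (" " ++ known))

-- ===== PORT B =====
def knownBlobs : List String := [
  "google|alphabet|meta|facebook|apple|amazon|microsoft|netflix|nvidia|intel|ibm|oracle",
  "salesforce|adobe|sap|vmware|cisco|qualcomm|broadcom|amd|texas instruments|aws|azure|gcp",
  "cloudflare|fastly|twilio|okta|datadog|splunk|pagerduty|elastic|mongodb|redis labs|hashicorp|confluent",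
  "databricks|snowflake|palantir|stripe|square|block|paypal|coinbase|robinhood|plaid|affirm|klarna",
  "brex|ripple|chime|wise|checkout.com|jpmorgan|jp morgan|goldman sachs|morgan stanley|wells fargo|bank of america|citibank",
  "citi|blackrock|fidelity|vanguard|american express|visa|mastercard|capital one|shopify|ebay|etsy|wayfair",
  "chewy|doordash|instacart|grubhub|uber eats|postmates|uber|lyft|airbnb|workday|servicenow|zendesk",
  "hubspot|atlassian|slack|zoom|dropbox|box|docusign|veeva|coupa|freshworks|sprinklr|medallia",
  "qualtrics|crowdstrike|palo alto networks|fortinet|zscaler|sentinelone|cyberark|rapid7|qualys|tenable|github|gitlab",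
  "jfrog|sonatype|circleci|harness|jetbrains|postman|new relic|unitedhealth|anthem|aetna|cigna|humana",
  "cvs health|johnson & johnson|pfizer|moderna|gilead|biogen|epic systems|cerner|allscripts|change healthcare|teladoc|veracyte",
  "guardant health|disney|warner bros|comcast|nbc universal|fox|viacomcbs|paramount|sony|spotify|tiktok|bytedance",
  "snapchat|twitter|x corp|reddit|pinterest|linkedin|mckinsey|bain|bcg|deloitte|pwc|kpmg",
  "ey|ernst & young|accenture|booz allen|leidos|saic|walmart|target|costco|kroger|home depot|lowes",
  "best buy|nordstrom|macy's|at&t|verizon|t-mobile|charter|lockheed martin|raytheon|boeing|northrop grumman|general dynamics",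
  "spacex|blue origin|tesla|ford|general motors|gm|toyota|honda|bmw|volkswagen|stellantis|rivian",
  "lucid|openai|anthropic|cohere|hugging face|scale ai|deepmind|inflection|stability ai"]

def knownListB : List String := knownBlobs.flatMap (fun blob => (PySem.Str.split? blob "|").getD [])

def knownSetB : PySem.Set String := PySem.Set.ofList knownListB

def is_known_company_py_alt (company_name : String) : Bool :=
  let name := PySem.Str.lower (PySem.Str.strip company_name)
  if PySem.Set.contains knownSetB name then true
  else
    (PySem.List.enumerate name.toList).any (fun p =>
      p.2 == ' '
        && (PySem.Set.contains knownSetB (PySem.Str.slice name none (some p.1))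
            || PySem.Set.contains knownSetB (PySem.Str.slice name (some (p.1 + 1)) none)))

-- ===== PRECONDITION & SPEC =====
def Spec_is_known_company_py (company_name : String) (out : Bool) : Prop := out = is_known_company_py_alt company_name
instance (company_name : String) (out : Bool) : Decidable (Spec_is_known_company_py company_name out) := by unfold Spec_is_known_company_py; infer_instance

-- ===== CLAIM =====
def Claim_equal_is_known_company_py : Prop := ∀ (company_name : String), Dom_is_known_company_py company_name → Spec_is_known_company_py company_name (is_known_company_py company_name)

-- ===== LEMMAS AND PROOFS =====

set_option maxRecDepth 100000 in
set_option maxHeartbeats 2000000 in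
theorem pv_blob_split : knownListB = knownCompaniesList := by decide

theorem pv_prefix_iff (k l : List Char) :
    (k ++ [' ']) <+: l ↔ ∃ i, ∃ _ : i < l.length, l[i] = ' ' ∧ l.take i = k := by
  constructor
  · rintro ⟨t, rfl⟩
    refine ⟨k.length, by simp, ?_, ?_⟩
    · simp
    · rw [List.append_assoc]
      exact List.take_left
  · rintro ⟨i, hi, hsp, rfl⟩
    have h : l.take i ++ [' '] = l.take (i + 1) := by
      rw [List.take_add_one]
      simp [List.getElem?_eq_getElem hi, hsp]
    rw [h]
    exact List.take_prefix _ _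

theorem pv_suffix_iff (k l : List Char) :
    (' ' :: k) <:+ l ↔ ∃ i, ∃ _ : i < l.length, l[i] = ' ' ∧ l.drop (i + 1) = k := by
  constructor
  · rintro ⟨t, rfl⟩
    refine ⟨t.length, by simp, ?_, ?_⟩
    · simp
    · rw [show t.length + 1 = t.length + 1 from rfl, ← List.drop_drop]
      simp
  · rintro ⟨i, hi, hsp, rfl⟩
    have h : ' ' :: l.drop (i + 1) = l.drop i := by
      rw [← hsp]; exact List.getElem_cons_drop hi
    rw [h]
    exact List.drop_suffix _ _

theorem pv_core (S : List String) (name : String) (h : name ∉ S) :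
    (S.any (fun known =>
      name == known
        || PySem.Str.startswith name (known ++ " ")
        || PySem.Str.endswith name (" " ++ known)))
    = ((PySem.List.enumerate name.toList).any (fun p =>
      p.2 == ' '
        && (PySem.Set.contains S (PySem.Str.slice name none (some p.1))
            || PySem.Set.contains S (PySem.Str.slice name (some (p.1 + 1)) none)))) := by
  rw [Bool.eq_iff_iff]
  simp only [List.any_eq_true, PySem.Set.contains, Bool.and_eq_true, Bool.or_eq_true,
    beq_iff_eq, PySem.List.mem_enumerate_iff,
    PySem.Str.startswith_eq, PySem.Str.endswith_eq,
    PySem.Chars.startswith_iff, PySem.Chars.endswith_iff]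
  constructor
  · rintro ⟨k, hk, hcase⟩
    rcases hcase with (rfl | hpre) | hsuf
    · exact absurd hk h
    · rw [show (k ++ " ").toList = k.toList ++ [' '] by simp, pv_prefix_iff] at hpre
      obtain ⟨i, hi, hsp, htake⟩ := hpre
      refine ⟨(↑i, name.toList[i]), ⟨i, hi, by simp⟩, by simpa using hsp, Or.inl ?_⟩
      have heq : PySem.Str.slice name none (some (↑i : Int)) = k := by
        apply String.ext
        rw [PySem.Str.toList_slice, PySem.Chars.slice_eq_listSlice,
          PySem.List.slice_to_natCast, htake]
      rw [heq]
      exact List.elem_eq_true_of_mem hk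
    · rw [show (" " ++ k).toList = ' ' :: k.toList by simp, pv_suffix_iff] at hsuf
      obtain ⟨i, hi, hsp, hdrop⟩ := hsuf
      refine ⟨(↑i, name.toList[i]), ⟨i, hi, by simp⟩, by simpa using hsp, Or.inr ?_⟩
      have heq : PySem.Str.slice name (some ((↑i : Int) + 1)) = k := by
        apply String.ext
        have hcast : ((↑i : Int) + 1) = ((i + 1 : Nat) : Int) := by push_cast; ring
        rw [PySem.Str.toList_slice, PySem.Chars.slice_eq_listSlice, hcast,
          PySem.List.slice_from_natCast, hdrop]
      rw [heq]
      exact List.elem_eq_true_of_mem hk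
  · rintro ⟨p, ⟨j, hj, rfl⟩, hsp, hcase⟩
    dsimp only at hsp hcase
    rcases hcase with hpre | hsuf
    · refine ⟨_, List.mem_of_elem_eq_true hpre, Or.inl (Or.inr ?_)⟩
      rw [show (PySem.Str.slice name none (some ((0 : Int) + ↑j)) ++ " ").toList
            = name.toList.take j ++ [' '] by
          simp [PySem.Str.toList_slice, PySem.Chars.slice_eq_listSlice,
            PySem.List.slice_to_natCast],
        pv_prefix_iff]
      exact ⟨j, hj, hsp, rfl⟩
    · refine ⟨_, List.mem_of_elem_eq_true hsuf, Or.inr ?_⟩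
      rw [show (" " ++ PySem.Str.slice name (some ((0 : Int) + ↑j + 1))).toList
            = ' ' :: name.toList.drop (j + 1) by
          simp only [PySem.Str.toList_slice, PySem.Chars.slice_eq_listSlice,
            String.toList_append]
          rw [show ((0 : Int) + ↑j + 1) = ((j + 1 : Nat) : Int) by push_cast; ring,
            PySem.List.slice_from_natCast]
          simp,
        pv_suffix_iff]
      exact ⟨j, hj, hsp, rfl⟩

theorem pv_sets_eq : knownSetB = knownCompaniesSet := by
  rw [knownSetB, knownCompaniesSet, pv_blob_split]

-- ===== VERDICT =====
theorem is_known_company_py_spec : Claim_equal_is_known_company_py := by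
  intro company_name _
  unfold Spec_is_known_company_py is_known_company_py is_known_company_py_alt
  rw [pv_sets_eq]
  by_cases hmem : PySem.Str.lower (PySem.Str.strip company_name) ∈ knownCompaniesSet
  · simp [PySem.Set.contains, hmem]
  · have hc : PySem.Set.contains knownCompaniesSet
        (PySem.Str.lower (PySem.Str.strip company_name)) = false := by
      simp [PySem.Set.contains, hmem]
    simp only [hc, Bool.false_eq_true, if_false]
    exact pv_core _ _ hmem
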